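-- pv_equiv track=rewrite | github.com/Joining-AI/JoinAgent | Packages/Memory/memory.py | shredder
-- ===== SOURCE A (Python) =====
-- def shredder(line_list, threshold):
--     """
--     将line_list中长度超过4倍threshold的行进行切割，尽量在标点符号或空格处断开，必要时适当向后延长。
--
--     参数:
--     line_list (list): 包含字符串的列表。
--     threshold (int): 切割长度的阈值。
--
--     返回:
--     list: 包含切割后字符串的新列表。
--     """
--     # 定义切割符列表，包含所有标点符号和空格
--     split_chars = " !$%&'()*+,-./:;<=>?@[]^_`{|}~　，。、；：？！…—·ˉ¨‘’“”々～‖∶＂＇｀｜〃〔〕〈〉《》「」『』．［］（）｛｝" # 注意不能添加\，以防截断换行符；虽然不全面，但是实际上大部分的时候这个断词表已经够用了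
--
--     new_line_list = []
--
--     for line in line_list:
--         if len(line) > 4 * threshold:
--             # 将行按threshold长度切割，尽量在标点符号或空格处断开
--             start = 0
--             while start < len(line):
--                 end = start + threshold
--                 if end < len(line):
--                     # 在threshold之后找到下一个标点符号或空格
--                     while end < len(line) and line[end] not in split_chars:
--                         end += 1
--                     if end < len(line):
--                         # 找到标点符号或空格，将其作为结束点
--                         new_line_list.append(line[start:end].rstrip())
--                         start = end + 1  # 跳过标点符号或空格
--                     else:
--                         # 没有更多标点符号或空格，使用剩余部分
--                         new_line_list.append(line[start:].rstrip())
--                         start = len(line)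
--                 else:
--                     # 没有更多标点符号或空格，使用剩余部分
--                     new_line_list.append(line[start:].rstrip())
--                     start = len(line)
--         else:
--             new_line_list.append(line)
--
--     return new_line_list
-- ===== SOURCE B (Python) =====
-- _SPLIT_CHARS = " !$%&'()*+,-./:;<=>?@[]^_`{|}~　，。、；：？！…—·ˉ¨‘’“”々～‖∶＂＇｀｜〃〔〕〈〉《》「」『』．［］（）｛｝"
--
--
-- def shredder(line_list, threshold):
--     """Same splitting as A, but per long line it precomputes the sorted list of
--     delimiter positions once and jumps along it with a pointer, instead of
--     re-scanning the line character by character after each cut."""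
--     out = []
--     for line in line_list:
--         n = len(line)
--         if n <= 4 * threshold:
--             out.append(line)
--             continue
--         positions = [i for i, c in enumerate(line) if c in _SPLIT_CHARS]
--         j = 0
--         start = 0
--         while start < n:
--             cut = start + threshold
--             if cut >= n:
--                 out.append(line[start:].rstrip())
--                 break
--             while j < len(positions) and positions[j] < cut:
--                 j += 1
--             if j < len(positions):
--                 p = positions[j]
--                 out.append(line[start:p].rstrip())
--                 start = p + 1
--                 j += 1
--             else:
--                 out.append(line[start:].rstrip())
--                 break
--     return out
-- ===== Notes on version B (the rewrite author's own statement) =====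
-- stated objective: alternative
-- what changed: Instead of A's character-by-character rescanning of the line after every cut, B precomputes for each long line the sorted list of delimiter positions once and jumps along it with a monotone pointer to find each cut point.
-- outside the precondition, e.g. on shredder(['ab'], -1): A returns ['ab'], B returns ['ab']
import Mathlib
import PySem

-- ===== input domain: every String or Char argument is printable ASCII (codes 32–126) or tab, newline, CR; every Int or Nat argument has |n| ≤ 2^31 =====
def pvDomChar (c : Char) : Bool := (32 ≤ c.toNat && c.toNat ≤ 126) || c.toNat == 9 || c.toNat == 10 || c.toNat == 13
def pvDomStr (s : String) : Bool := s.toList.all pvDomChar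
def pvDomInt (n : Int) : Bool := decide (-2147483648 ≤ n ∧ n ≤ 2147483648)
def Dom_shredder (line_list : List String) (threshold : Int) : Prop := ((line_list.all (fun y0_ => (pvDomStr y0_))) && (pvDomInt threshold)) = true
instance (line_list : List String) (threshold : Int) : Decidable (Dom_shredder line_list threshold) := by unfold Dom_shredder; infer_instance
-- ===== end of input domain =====

-- B replaces A's per-cut character-by-character rescanning with one precomputed list of
-- delimiter positions per long line, walked by a monotone pointer (objective: alternative).

-- ===== PORT A =====
def pvSplitChars : List Char := " !$%&'()*+,-./:;<=>?@[]^_`{|}~　，。、；：？！…—·ˉ¨‘’“”々～‖∶＂＇｀｜〃〔〕〈〉《》「」『』．［］（）｛｝".toList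

-- inner `while end < len(line) and line[end] not in split_chars: end += 1`
def findEndA (l : List Char) (e : Int) (fuel : Nat) : Int :=
  match fuel with
  | 0 => e
  | f + 1 =>
    if e < (l.length : Int) then
      match PySem.List.pyGet? l e with
      | some c => if c ∈ pvSplitChars then e else findEndA l (e + 1) f
      | none => e      -- IndexError (negative end below -len); outside Pre_
    else e

-- outer `while start < len(line)` loop of A (fuel ≥ len+1 suffices inside Pre_)
def lineLoopA (l : List Char) (t : Int) (start : Int) (acc : List String) (fuel : Nat) : List String :=
  match fuel with
  | 0 => acc
  | f + 1 =>
    if start < (l.length : Int) then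
      let e := start + t
      if e < (l.length : Int) then
        let e' := findEndA l e (l.length + 1)
        if e' < (l.length : Int) then
          lineLoopA l t (e' + 1) (acc ++ [String.ofList (PySem.Chars.rstrip (PySem.List.slice l (some start) (some e')))]) f
        else
          lineLoopA l t (l.length : Int) (acc ++ [String.ofList (PySem.Chars.rstrip (PySem.List.slice l (some start) none))]) f
      else
        lineLoopA l t (l.length : Int) (acc ++ [String.ofList (PySem.Chars.rstrip (PySem.List.slice l (some start) none))]) f
    else acc

def shredder (line_list : List String) (threshold : Int) : List String :=
  line_list.foldl (fun acc line =>
    if (line.toList.length : Int) > 4 * threshold then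
      lineLoopA line.toList threshold 0 acc (line.toList.length + 1)
    else acc ++ [line]) []

-- ===== PORT B =====
-- positions = [i for i, c in enumerate(line) if c in _SPLIT_CHARS]
def posB (l : List Char) : List Int :=
  ((PySem.List.enumerate l 0).filter (fun p => p.2 ∈ pvSplitChars)).map (fun p => p.1)

-- `while j < len(positions) and positions[j] < cut: j += 1`
def skipJ (ps : List Int) (j : Nat) (cut : Int) : Nat :=
  if h : j < ps.length then
    if ps[j] < cut then skipJ ps (j + 1) cut else j
  else j
termination_by ps.length - j

-- B's `while start < n` loop over one long line
def lineLoopB (l : List Char) (t : Int) (ps : List Int) (j : Nat) (start : Int) (acc : List String) (fuel : Nat) : List String :=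
  match fuel with
  | 0 => acc
  | f + 1 =>
    if start < (l.length : Int) then
      let cut := start + t
      if (l.length : Int) ≤ cut then
        acc ++ [String.ofList (PySem.Chars.rstrip (PySem.List.slice l (some start) none))]
      else
        let j' := skipJ ps j cut
        if h : j' < ps.length then
          lineLoopB l t ps (j' + 1) (ps[j'] + 1) (acc ++ [String.ofList (PySem.Chars.rstrip (PySem.List.slice l (some start) (some ps[j'])))]) f
        else
          acc ++ [String.ofList (PySem.Chars.rstrip (PySem.List.slice l (some start) none))]
    else acc

def shredder_alt (line_list : List String) (threshold : Int) : List String :=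
  line_list.foldl (fun acc line =>
    if (line.toList.length : Int) ≤ 4 * threshold then acc ++ [line]
    else lineLoopB line.toList threshold (posB line.toList) 0 0 acc (line.toList.length + 1)) []

-- ===== PRECONDITION & SPEC =====
-- Pre_ excludes threshold < 0: there A's `line[end]` index goes negative, so A raises
-- IndexError or loops forever on many inputs, and any value it does return is an accident
-- of Python's negative-index wraparound.
def Pre_shredder (line_list : List String) (threshold : Int) : Prop := 0 ≤ threshold
instance (line_list : List String) (threshold : Int) : Decidable (Pre_shredder line_list threshold) := by unfold Pre_shredder; infer_instance

def pvWitness_shredder : List String × Int := (["ab, cd ef.g", "x"], 2)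

def Spec_shredder (line_list : List String) (threshold : Int) (out : List String) : Prop := out = shredder_alt line_list threshold
instance (line_list : List String) (threshold : Int) (out : List String) : Decidable (Spec_shredder line_list threshold out) := by unfold Spec_shredder; infer_instance

-- ===== CLAIM (what is proved, stated in full; the proofs are below) =====
def Claim_equal_shredder : Prop := ∀ (line_list : List String) (threshold : Int), Dom_shredder line_list threshold → Pre_shredder line_list threshold → Spec_shredder line_list threshold (shredder line_list threshold)

-- ===== LEMMAS AND PROOFS =====

-- proof-side spec of A's inner scan, in Nat
def nextD (l : List Char) (k : Nat) : Nat :=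
  if h : k < l.length then (if l[k] ∈ pvSplitChars then k else nextD l (k + 1)) else k
termination_by l.length - k

theorem nextD_le_ge (l : List Char) (k : Nat) : k ≤ nextD l k ∧ nextD l k ≤ max k l.length := by
  induction k using nextD.induct (l := l) with
  | case1 k hk hm => rw [nextD]; simp [hk, hm]
  | case2 k hk hm ih => rw [nextD]; simp [hk, hm]; omega
  | case3 k hk => rw [nextD]; simp [hk]

theorem nextD_delim (l : List Char) (k : Nat) (h : nextD l k < l.length) : l.getD (nextD l k) ' ' ∈ pvSplitChars := by
  induction k using nextD.induct (l := l) with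
  | case1 k hk hm =>
    have e : nextD l k = k := by rw [nextD]; simp [hk, hm]
    rw [e, List.getD_eq_getElem l ' ' hk]; exact hm
  | case2 k hk hm ih =>
    have e : nextD l k = nextD l (k + 1) := by rw [nextD]; simp [hk, hm]
    rw [e] at h ⊢; exact ih h
  | case3 k hk =>
    have e : nextD l k = k := by rw [nextD]; simp [hk]
    rw [e] at h; omega

theorem nextD_min (l : List Char) (k m : Nat) (h2 : m < l.length) (h3 : l[m] ∈ pvSplitChars) : k ≤ m → nextD l k ≤ m := by
  induction k using nextD.induct (l := l) with
  | case1 k hk hm => intro h1; rw [nextD]; simp [hk, hm]; exact h1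
  | case2 k hk hm ih =>
    intro h1
    rw [nextD]; simp [hk, hm]
    rcases Nat.eq_or_lt_of_le h1 with rfl | hlt
    · exact absurd h3 hm
    · exact ih hlt
  | case3 k hk => intro h1; rw [nextD]; simp [hk]; exact h1

theorem findEndA_eq_nextD (l : List Char) : ∀ (f k : Nat), l.length ≤ k + f → findEndA l (k : Int) f = (nextD l k : Int) := by
  intro f
  induction f with
  | zero =>
    intro k hk
    rw [findEndA, nextD]
    have h2 : ¬ (k < l.length) := by omega
    simp [h2]
  | succ f ih =>
    intro k hk
    rw [findEndA, nextD]
    by_cases h : k < l.length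
    · have h1 : (k : Int) < (l.length : Int) := by omega
      rw [if_pos h1, dif_pos h]
      simp only [PySem.List.pyGet?_natCast, List.getElem?_eq_getElem h]
      by_cases hm : l[k] ∈ pvSplitChars
      · simp [hm]
      · simp only [hm, if_false]
        have := ih (k + 1) (by omega)
        push_cast at this ⊢
        exact this
    · have h1 : ¬ ((k : Int) < (l.length : Int)) := by omega
      simp [h1, h]

theorem mem_posB (l : List Char) (x : Int) : x ∈ posB l ↔ ∃ (m : Nat) (h : m < l.length), x = (m : Int) ∧ l[m] ∈ pvSplitChars := by
  unfold posB
  simp only [List.mem_map, List.mem_filter]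
  constructor
  · rintro ⟨p, ⟨hp, hd⟩, rfl⟩
    rcases (PySem.List.mem_enumerate_iff l 0 p).1 hp with ⟨m, hm, rfl⟩
    exact ⟨m, hm, by simp, by simpa using hd⟩
  · rintro ⟨m, hm, rfl, hd⟩
    refine ⟨((m : Int), l[m]), ⟨?_, by simpa using hd⟩, rfl⟩
    exact (PySem.List.mem_enumerate_iff l 0 _).2 ⟨m, hm, by simp⟩

theorem pairwise_posB (l : List Char) : (posB l).Pairwise (· < ·) := by
  unfold posB
  exact List.Pairwise.map _ (fun a b h => h) ((PySem.List.pairwise_lt_enumerate l 0).filter _)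

theorem lineLoopA_len (l : List Char) (t : Int) (acc : List String) (f : Nat) : lineLoopA l t (l.length : Int) acc f = acc := by
  cases f with
  | zero => rw [lineLoopA]
  | succ f => rw [lineLoopA]; simp

theorem skipJ_spec (ps : List Int) (cut : Int) : ∀ (j : Nat), j ≤ ps.length → (∀ x ∈ ps.take j, x < cut) →
    j ≤ skipJ ps j cut ∧ skipJ ps j cut ≤ ps.length ∧ (∀ x ∈ ps.take (skipJ ps j cut), x < cut) ∧
      (∀ h : skipJ ps j cut < ps.length, cut ≤ ps[skipJ ps j cut]) := by
  intro j
  induction j using skipJ.induct (ps := ps) (cut := cut) with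
  | case1 j h hlt ih =>
    intro _ hinv
    have e : skipJ ps j cut = skipJ ps (j + 1) cut := by rw [skipJ]; simp [h, hlt]
    have hinv' : ∀ x ∈ ps.take (j + 1), x < cut := by
      intro x hx
      rw [List.take_add_one] at hx
      rcases List.mem_append.1 hx with hx | hx
      · exact hinv x hx
      · simp [List.getElem?_eq_getElem h] at hx
        subst hx; exact hlt
    have := ih h hinv'
    rw [e]
    exact ⟨by omega, this.2.1, this.2.2.1, this.2.2.2⟩
  | case2 j h hge =>
    intro hj hinv
    have e : skipJ ps j cut = j := by rw [skipJ]; simp [h, hge]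
    rw [e]
    exact ⟨le_refl _, hj, hinv, fun _ => by omega⟩
  | case3 j h =>
    intro hj hinv
    have e : skipJ ps j cut = j := by rw [skipJ]; simp [h]
    rw [e]
    exact ⟨le_refl _, hj, hinv, fun hh => absurd hh h⟩

theorem mem_take_of_lt {ps : List Int} {i j : Nat} (hij : i < j) (hi : i < ps.length) : ps[i] ∈ ps.take j := by
  have hlen : i < (ps.take j).length := by simp [List.length_take]; omega
  have := List.getElem_mem hlen
  rwa [List.getElem_take] at this

theorem loop_eq (l : List Char) (t : Int) (ht : 0 ≤ t) :
    ∀ (fuel : Nat) (start : Int) (j : Nat) (acc : List String),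
      0 ≤ start → l.length ≤ start.toNat + fuel →
      j ≤ (posB l).length → (∀ x ∈ (posB l).take j, x < start) →
      lineLoopA l t start acc fuel = lineLoopB l t (posB l) j start acc fuel := by
  intro fuel
  induction fuel with
  | zero => intro start j acc _ _ _ _; rw [lineLoopA, lineLoopB]
  | succ f ih =>
    intro start j acc h0 hfuel hj hinv
    rw [lineLoopA, lineLoopB]
    by_cases hs : start < (l.length : Int)
    · simp only [if_pos hs]
      by_cases hc : start + t < (l.length : Int)
      · have hcle : ¬ ((l.length : Int) ≤ start + t) := by omega
        rw [if_pos hc, if_neg hcle]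
        -- A's inner scan = nextD
        have hc0 : 0 ≤ start + t := by omega
        set c : Nat := (start + t).toNat with hcdef
        have hcast : ((c : Nat) : Int) = start + t := Int.toNat_of_nonneg hc0
        have hclen : c < l.length := by omega
        have hfe : findEndA l (start + t) (l.length + 1) = ((nextD l c : Nat) : Int) := by
          rw [← hcast]; exact findEndA_eq_nextD l (l.length + 1) c (by omega)
        set d : Nat := nextD l c with hddef
        have hcd : c ≤ d ∧ d ≤ max c l.length := nextD_le_ge l c
        -- B's pointer jump
        obtain ⟨hjj', hj'len, hinv', hge⟩ :=
          skipJ_spec (posB l) (start + t) j hj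
            (fun x hx => lt_of_lt_of_le (hinv x hx) (by omega))
        set j' : Nat := skipJ (posB l) j (start + t) with hj'def
        by_cases hd : d < l.length
        · -- a delimiter at index d ≥ cut exists
          have hdel : l[d] ∈ pvSplitChars := by
            have := nextD_delim l c hd
            rwa [List.getD_eq_getElem l ' ' hd] at this
          have hdmem : ((d : Nat) : Int) ∈ posB l := (mem_posB l _).2 ⟨d, hd, rfl, hdel⟩
          have hcutd : start + t ≤ ((d : Nat) : Int) := by omega
          have hj'lt : j' < (posB l).length := by
            by_contra hno
            have hfull : (posB l).take j' = posB l := List.take_of_length_le (by omega)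
            have := hinv' _ (by rw [hfull]; exact hdmem)
            omega
          -- posB[j'] = d
          have hpj : (posB l)[j'] = ((d : Nat) : Int) := by
            have h1 : start + t ≤ (posB l)[j'] := hge hj'lt
            obtain ⟨m, hmlt, hpse, hmdel⟩ := (mem_posB l _).1 (List.getElem_mem hj'lt)
            have hcm : c ≤ m := by omega
            have hdm : d ≤ m := nextD_min l c m hmlt hmdel hcm
            have hle1 : ((d : Nat) : Int) ≤ (posB l)[j'] := by omega
            obtain ⟨i, hilt, hie⟩ := List.getElem_of_mem hdmem
            have hij : ¬ i < j' := by
              intro hlt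
              have := hinv' _ (mem_take_of_lt hlt hilt)
              omega
            have hle2 : (posB l)[j'] ≤ ((d : Nat) : Int) := by
              rcases Nat.lt_or_ge j' i with hji | hji
              · have := (List.pairwise_iff_getElem.1 (pairwise_posB l)) j' i hj'lt hilt hji
                rw [hie] at this; omega
              · have hji' : j' = i := by omega
                have e3 : (posB l)[j']? = (posB l)[i]? := by rw [hji']
                rw [List.getElem?_eq_getElem hj'lt, List.getElem?_eq_getElem hilt, hie] at e3
                have := Option.some.inj e3
                omega
            omega
          have hdl : ((d : Nat) : Int) < (l.length : Int) := by omega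
          rw [hfe, if_pos hdl, dif_pos hj'lt, hpj]
          apply ih
          · omega
          · have hsc : start.toNat ≤ c := by omega
            have : ((d : Nat) : Int) + 1 = ((d + 1 : Nat) : Int) := by omega
            rw [this, Int.toNat_natCast]
            omega
          · omega
          · intro x hx
            rw [List.take_add_one] at hx
            rcases List.mem_append.1 hx with hx | hx
            · have := hinv' x hx; omega
            · simp [List.getElem?_eq_getElem hj'lt] at hx
              subst hx; rw [hpj]; omega
        · -- no delimiter at or after cut: d = len
          have hdlen : d = l.length := by omega
          have hj'full : ¬ j' < (posB l).length := by
            intro hlt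
            obtain ⟨m, hmlt, hpse, hmdel⟩ := (mem_posB l _).1 (List.getElem_mem hlt)
            have h1 : start + t ≤ (posB l)[j'] := hge hlt
            have hcm : c ≤ m := by omega
            have := nextD_min l c m hmlt hmdel hcm
            omega
          have hnd : ¬ (((d : Nat) : Int) < (l.length : Int)) := by omega
          rw [hfe, if_neg hnd, dif_neg hj'full, lineLoopA_len]
      · have hcle : (l.length : Int) ≤ start + t := by omega
        rw [if_neg hc, if_pos hcle, lineLoopA_len]
    · simp only [if_neg hs]

theorem step_eq (t : Int) (ht : 0 ≤ t) (acc : List String) (line : String) :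
    (if ((line.toList.length : Int) > 4 * t) then lineLoopA line.toList t 0 acc (line.toList.length + 1) else acc ++ [line]) =
    (if ((line.toList.length : Int) ≤ 4 * t) then acc ++ [line] else lineLoopB line.toList t (posB line.toList) 0 0 acc (line.toList.length + 1)) := by
  by_cases hgt : (line.toList.length : Int) > 4 * t
  · rw [if_pos hgt, if_neg (by omega)]
    exact loop_eq line.toList t ht (line.toList.length + 1) 0 0 acc (le_refl 0) (by simp) (Nat.zero_le _) (by simp)
  · rw [if_neg hgt, if_pos (by omega)]

-- ===== VERDICT (by name: the statement is the Claim_ definition above) =====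
theorem shredder_spec : Claim_equal_shredder := by
  intro ll t _ hpre
  unfold Spec_shredder shredder shredder_alt
  have h : (fun (acc : List String) (line : String) =>
      if ((line.toList.length : Int) > 4 * t) then lineLoopA line.toList t 0 acc (line.toList.length + 1) else acc ++ [line]) =
      (fun (acc : List String) (line : String) =>
      if ((line.toList.length : Int) ≤ 4 * t) then acc ++ [line] else lineLoopB line.toList t (posB line.toList) 0 0 acc (line.toList.length + 1)) := by
    funext acc line; exact step_eq t hpre acc line
  rw [h]
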